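-- pv_equiv track=rewrite | github.com/Jognn/Python-Macierze | main.py | sprawdz_wymiary
-- ===== SOURCE A (Python) =====
-- def sprawdz_wymiary(tablica): # UP
--     for index, item in enumerate(tablica):
--         if index == 0:
--             ostatnia = len(item)
--             continue
--
--         if len(item) != ostatnia:
--             return True
--
--         ostatnia = len(item)
--     return False
-- ===== SOURCE B (Python) =====
-- def sprawdz_wymiary(tablica):
--     return len({len(item) for item in tablica}) > 1
-- ===== Notes on version B (the rewrite author's own statement) =====
-- stated objective: simpler
-- what changed: Replaces the stateful loop tracking the previous row's length with a one-line cardinality check on the set of distinct row lengths.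
import Mathlib
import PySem

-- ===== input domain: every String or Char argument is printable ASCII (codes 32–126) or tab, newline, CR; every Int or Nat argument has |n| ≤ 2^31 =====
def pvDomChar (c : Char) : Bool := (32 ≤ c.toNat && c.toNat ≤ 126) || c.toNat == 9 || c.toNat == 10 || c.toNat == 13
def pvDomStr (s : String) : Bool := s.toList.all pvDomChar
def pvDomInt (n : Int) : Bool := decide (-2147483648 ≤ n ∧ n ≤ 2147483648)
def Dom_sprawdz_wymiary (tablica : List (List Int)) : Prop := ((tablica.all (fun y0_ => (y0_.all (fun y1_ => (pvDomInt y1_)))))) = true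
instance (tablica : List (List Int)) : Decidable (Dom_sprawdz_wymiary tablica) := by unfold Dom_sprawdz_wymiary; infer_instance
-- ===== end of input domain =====

-- B replaces the previous-length tracking loop by a cardinality check on the set of distinct row lengths (simpler).
-- ===== PORT A =====
-- the 'for index, item in enumerate(...)' loop after the index-0 step: carries 'ostatnia'
def pvLoopA (ostatnia : Nat) : List (List Int) → Bool
  | [] => false
  | item :: rest => if item.length ≠ ostatnia then true else pvLoopA item.length rest

def sprawdz_wymiary (tablica : List (List Int)) : Bool :=
  match tablica with
  | [] => false
  | first :: rest => pvLoopA first.length rest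

-- ===== PORT B =====
def sprawdz_wymiary_alt (tablica : List (List Int)) : Bool :=
  PySem.Set.len (PySem.Set.ofList (tablica.map (fun item => item.length))) > 1

-- ===== PRECONDITION & SPEC =====
def Spec_sprawdz_wymiary (tablica : List (List Int)) (out : Bool) : Prop := out = sprawdz_wymiary_alt tablica
instance (tablica : List (List Int)) (out : Bool) : Decidable (Spec_sprawdz_wymiary tablica out) := by unfold Spec_sprawdz_wymiary; infer_instance

-- ===== CLAIM (what is proved, stated in full; the proofs are below) =====
def Claim_equal_sprawdz_wymiary : Prop := ∀ (tablica : List (List Int)), Dom_sprawdz_wymiary tablica → Spec_sprawdz_wymiary tablica (sprawdz_wymiary tablica)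

-- ===== LEMMAS AND PROOFS =====

-- ===== VERDICT below =====


theorem pvLoopA_eq (L : Nat) (xs : List (List Int)) :
    pvLoopA L xs = !(xs.all (fun x => x.length == L)) := by
  induction xs generalizing L with
  | nil => rfl
  | cons x rest ih =>
      by_cases h : x.length = L
      · simp [pvLoopA, h, ih]
      · simp [pvLoopA, h]

theorem pvFoldlAdd_const (ls : List Nat) (s : PySem.Set Nat)
    (h : ∀ x ∈ ls, x ∈ s) : ls.foldl PySem.Set.add s = s := by
  induction ls with
  | nil => rfl
  | cons a t ih =>
      have ha : PySem.Set.contains s a = true := by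
        simp [PySem.Set.contains]; exact h a (by simp)
      simp only [List.foldl_cons, PySem.Set.add, ha, if_pos]
      exact ih (fun x hx => h x (by simp [hx]))

theorem pvTwoMemLen {s : List Nat} {x y : Nat} (hx : x ∈ s) (hy : y ∈ s)
    (hxy : x ≠ y) : 1 < s.length := by
  match s with
  | [] => simp at hx
  | [a] =>
      simp at hx hy
      omega
  | a :: b :: t => simp

theorem sprawdz_wymiary_spec : Claim_equal_sprawdz_wymiary := by
  intro tablica _
  unfold Spec_sprawdz_wymiary
  cases tablica with
  | nil => rfl
  | cons first rest =>
      show pvLoopA first.length rest = sprawdz_wymiary_alt (first :: rest)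
      rw [pvLoopA_eq]
      unfold sprawdz_wymiary_alt
      by_cases h : ∀ x ∈ rest, x.length = first.length
      · have hall : rest.all (fun x => x.length == first.length) = true := by
          simp [List.all_eq_true]; exact h
        have hset : PySem.Set.ofList ((first :: rest).map (fun item => item.length))
            = [first.length] := by
          simp only [List.map_cons, PySem.Set.ofList, List.foldl_cons]
          have : PySem.Set.add PySem.Set.empty first.length = [first.length] := rfl
          rw [this]
          apply pvFoldlAdd_const
          intro x hx
          rcases List.mem_map.1 hx with ⟨y, hy, rfl⟩
          simp [h y hy]
        rw [hset, hall]
        rfl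
      · push Not at h
        rcases h with ⟨x, hx, hne⟩
        have hall : rest.all (fun x => x.length == first.length) = false := by
          simp [List.all_eq_false]; exact ⟨x, hx, hne⟩
        rw [hall]
        have h1 : x.length ∈ PySem.Set.ofList ((first :: rest).map (fun item => item.length)) :=
          (PySem.Set.mem_ofList _ _).2 (by simp; exact Or.inr ⟨x, hx, rfl⟩)
        have h2 : first.length ∈ PySem.Set.ofList ((first :: rest).map (fun item => item.length)) :=
          (PySem.Set.mem_ofList _ _).2 (by simp)
        have hlen := pvTwoMemLen h1 h2 hne
        simp only [PySem.Set.len]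
        simp only [Bool.not_false, gt_iff_lt]
        symm
        simp only [decide_eq_true_eq]
        exact_mod_cast hlen
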